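-- pv_equiv track=rewrite | github.com/tkimweston/CCI | power.py | powerRecMemo
-- ===== SOURCE A (Python) =====
-- def powerRecMemo(x, n, memo):
--     if n == 0:
--         return 1
--     if n == 1:
--         return x
--
--     if n in memo:
--         r = memo[n]
--     else:
--         r = powerRecMemo(x, n // 2, memo)
--         memo[n // 2] = r
--
--     if n % 2 == 0:
--         return r * r
--     else:
--         return x * r * r
-- ===== SOURCE B (Python) =====
-- def powerRecMemo(x, n, memo):
--     # Iterative version: descend with an explicit stack, then unwind.
--     # Mutates memo exactly as the recursive original does.
--     stack = []
--     m = n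
--     while True:
--         if m == 0:
--             val = 1
--             break
--         if m == 1:
--             val = x
--             break
--         if m in memo:
--             r = memo[m]
--             val = r * r if m % 2 == 0 else x * r * r
--             break
--         stack.append(m)
--         m = m // 2
--     while stack:
--         fm = stack.pop()
--         r = val
--         memo[fm // 2] = r
--         val = r * r if fm % 2 == 0 else x * r * r
--     return val
-- ===== Notes on version B (the rewrite author's own statement) =====
-- stated objective: alternative
-- what changed: Replaces the recursive descent with an explicit-stack iteration: a first loop walks n -> n//2 down to a base case or memo hit, a second loop unwinds the pushed frames, performing the same memo writes and combines in the same order.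
-- outside the precondition, e.g. on powerRecMemo(2, -2, {-1: 5}): A returns 2500, B returns 2500
import Mathlib
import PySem

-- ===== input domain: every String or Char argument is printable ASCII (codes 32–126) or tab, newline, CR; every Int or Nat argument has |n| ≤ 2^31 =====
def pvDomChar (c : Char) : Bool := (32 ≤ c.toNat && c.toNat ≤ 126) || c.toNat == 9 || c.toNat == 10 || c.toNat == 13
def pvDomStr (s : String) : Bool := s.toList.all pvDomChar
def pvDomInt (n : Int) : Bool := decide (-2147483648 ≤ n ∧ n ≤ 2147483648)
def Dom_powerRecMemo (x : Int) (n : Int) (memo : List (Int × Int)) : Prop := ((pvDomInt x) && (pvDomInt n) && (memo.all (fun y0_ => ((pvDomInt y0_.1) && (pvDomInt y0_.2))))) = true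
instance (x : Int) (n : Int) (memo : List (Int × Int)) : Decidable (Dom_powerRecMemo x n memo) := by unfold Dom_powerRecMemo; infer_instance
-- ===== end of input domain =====

-- B replaces A's recursion by an explicit-stack descend/unwind iteration (objective: alternative
-- decomposition, same cost). Python A and B both mutate `memo` in place identically; the
-- equivalence proved here is about the RETURN value only.

-- ===== PORT A =====
-- Fuel only guards totality (A's recursion m -> m//2 does not terminate for negative m);
-- for every input admitted by Pre_ (0 ≤ n) the fuel n.natAbs + 2 is never exhausted.
-- The pair threads the dict to model A's in-place writes `memo[n//2] = r` faithfully.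
def powerRecMemoGo (x : Int) (fuel : Nat) (n : Int) (memo : PySem.Dict Int Int) :
    Int × PySem.Dict Int Int :=
  match fuel with
  | 0 => (0, memo)
  | fuel + 1 =>
    if n = 0 then (1, memo)
    else if n = 1 then (x, memo)
    else
      match PySem.Dict.get? memo n with
      | some r => (if PySem.Int.mod n 2 = 0 then r * r else x * r * r, memo)
      | none =>
        let p := powerRecMemoGo x fuel (PySem.Int.floordiv n 2) memo
        let memo' := PySem.Dict.insert p.2 (PySem.Int.floordiv n 2) p.1
        (if PySem.Int.mod n 2 = 0 then p.1 * p.1 else x * p.1 * p.1, memo')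

def powerRecMemo (x : Int) (n : Int) (memo : List (Int × Int)) : Int :=
  (powerRecMemoGo x (n.natAbs + 2) n (PySem.Dict.mk memo)).1

-- ===== PORT B =====
-- Descend loop of Source B: walks m -> m//2 pushing frames, stops at a base case or memo hit;
-- returns (val, stack) with the deepest frame at the head (Python pops from the end).
-- Same fuel guard as A's port (the Python loop spins forever at m = -1 for negative input).
def powerDescend (x : Int) (fuel : Nat) (m : Int) (memo : PySem.Dict Int Int)
    (stack : List Int) : Int × List Int :=
  match fuel with
  | 0 => (0, stack)
  | fuel + 1 =>
    if m = 0 then (1, stack)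
    else if m = 1 then (x, stack)
    else
      match PySem.Dict.get? memo m with
      | some r => (if PySem.Int.mod m 2 = 0 then r * r else x * r * r, stack)
      | none => powerDescend x fuel (PySem.Int.floordiv m 2) memo (m :: stack)

def powerRecMemo_alt (x : Int) (n : Int) (memo : List (Int × Int)) : Int :=
  let d := powerDescend x (n.natAbs + 2) n (PySem.Dict.mk memo) []
  -- unwind loop of Source B: pop frames, write memo[fm//2] = r, combine by parity of fm
  (d.2.foldl
    (fun (p : Int × PySem.Dict Int Int) fm =>
      (if PySem.Int.mod fm 2 = 0 then p.1 * p.1 else x * p.1 * p.1,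
       PySem.Dict.insert p.2 (PySem.Int.floordiv fm 2) p.1))
    (d.1, PySem.Dict.mk memo)).1

-- ===== PRECONDITION & SPEC =====
-- Pre_ excludes negative n: there A's recursion n -> n//2 sticks at the fixed point -1 and
-- overflows the stack (RecursionError) unless the caller's memo happens to contain a key on
-- that chain (e.g. (2, -2, {-1: 5}), where A returns 2500 and B returns 2500 as well).
def Pre_powerRecMemo (x : Int) (n : Int) (memo : List (Int × Int)) : Prop := 0 ≤ n
instance (x : Int) (n : Int) (memo : List (Int × Int)) : Decidable (Pre_powerRecMemo x n memo) := by unfold Pre_powerRecMemo; infer_instance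

def pvWitness_powerRecMemo : Int × Int × (List (Int × Int)) := (3, 10, [(4, 7)])

def Spec_powerRecMemo (x : Int) (n : Int) (memo : List (Int × Int)) (out : Int) : Prop := out = powerRecMemo_alt x n memo
instance (x : Int) (n : Int) (memo : List (Int × Int)) (out : Int) : Decidable (Spec_powerRecMemo x n memo out) := by unfold Spec_powerRecMemo; infer_instance

-- ===== CLAIM (what is proved, stated in full; the proofs are below) =====
def Claim_equal_powerRecMemo : Prop := ∀ (x : Int) (n : Int) (memo : List (Int × Int)), Dom_powerRecMemo x n memo → Pre_powerRecMemo x n memo → Spec_powerRecMemo x n memo (powerRecMemo x n memo)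

-- ===== LEMMAS AND PROOFS =====

-- The unwind step never feeds the dict component back into the value component, so the value
-- produced by the unwind fold depends only on the starting value and the stack.
def pvUnwindVal (x : Int) (stack : List Int) (v : Int) : Int :=
  stack.foldl (fun val fm => if PySem.Int.mod fm 2 = 0 then val * val else x * val * val) v

theorem pvUnwind_fst (x : Int) (stack : List Int) (v : Int) (q : PySem.Dict Int Int) :
    (stack.foldl
      (fun (p : Int × PySem.Dict Int Int) fm =>
        (if PySem.Int.mod fm 2 = 0 then p.1 * p.1 else x * p.1 * p.1,
         PySem.Dict.insert p.2 (PySem.Int.floordiv fm 2) p.1))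
      (v, q)).1 = pvUnwindVal x stack v := by
  induction stack generalizing v q with
  | nil => rfl
  | cons fm rest ih => simp [pvUnwindVal, List.foldl] at ih ⊢; exact ih _ _

-- Main invariant: unwinding the frames produced by the descend from m over stack s equals
-- unwinding s from A's recursive value for m (with the same fuel and the same initial memo;
-- A's recursive reads all happen before its writes, so its value only depends on `memo`).
theorem pvMain (x : Int) (memo : PySem.Dict Int Int) :
    ∀ (fuel : Nat) (m : Int) (s : List Int),
      pvUnwindVal x (powerDescend x fuel m memo s).2 (powerDescend x fuel m memo s).1
        = pvUnwindVal x s (powerRecMemoGo x fuel m memo).1 := by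
  intro fuel
  induction fuel with
  | zero => intro m s; rfl
  | succ fuel ih =>
    intro m s
    by_cases h0 : m = 0
    · simp [powerDescend, powerRecMemoGo, h0]
    · by_cases h1 : m = 1
      · simp [powerDescend, powerRecMemoGo, h1]
      · cases hg : PySem.Dict.get? memo m with
        | some r => simp [powerDescend, powerRecMemoGo, h0, h1, hg]
        | none =>
          have := ih (PySem.Int.floordiv m 2) (m :: s)
          simp [powerDescend, powerRecMemoGo, h0, h1, hg, pvUnwindVal, List.foldl] at this ⊢
          exact this

-- ===== VERDICT (by name: the statement is the Claim_ definition above) =====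
theorem powerRecMemo_spec : Claim_equal_powerRecMemo := by
  intro x n memo _ _
  unfold Spec_powerRecMemo powerRecMemo powerRecMemo_alt
  rw [pvUnwind_fst, pvMain]
  rfl
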